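-- pv_equiv track=rewrite | github.com/jeremymeadows/advent-of-code | puzzles/year2023/day15.py | part1
-- ===== SOURCE A (Python) =====
-- def part1(inpt):
--     result = 0
--     for code in inpt.split(','):
--         curr = 0
--         for ch in code:
--             curr = (curr + ord(ch)) * 17 % 256
--         result += curr
--     return result
-- ===== SOURCE B (Python) =====
-- def part1(inpt):
--     curr = 0
--     result = 0
--     for ch in inpt:
--         if ch == ',':
--             result += curr
--             curr = 0
--         else:
--             curr = (curr + ord(ch)) * 17 % 256
--     return result + curr
-- ===== Notes on version B (the rewrite author's own statement) =====
-- stated objective: alternative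
-- what changed: B replaces A's split-into-segments-then-nested-hash-loop with a single flat pass over the characters that handles the delimiter inline, maintaining the running hash and the running total in one loop and never materialising the list of codes.
import Mathlib
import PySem

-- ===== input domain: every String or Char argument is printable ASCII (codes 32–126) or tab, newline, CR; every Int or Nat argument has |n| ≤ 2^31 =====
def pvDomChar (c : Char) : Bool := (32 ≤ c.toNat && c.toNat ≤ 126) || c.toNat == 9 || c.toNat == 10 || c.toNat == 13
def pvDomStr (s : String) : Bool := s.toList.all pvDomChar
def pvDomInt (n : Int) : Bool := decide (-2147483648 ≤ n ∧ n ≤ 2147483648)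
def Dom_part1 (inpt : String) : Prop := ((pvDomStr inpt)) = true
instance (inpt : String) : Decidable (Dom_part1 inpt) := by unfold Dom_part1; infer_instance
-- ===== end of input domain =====

-- B folds the ',' delimiter handling into one flat pass over the characters (no split, one loop) — alternative decomposition, same cost.


-- ===== PORT A =====
-- inner loop of A: curr = (curr + ord(ch)) * 17 % 256 over one code
def hashCode (code : List Char) : Int :=
  code.foldl (fun curr ch => PySem.Int.mod ((curr + (ch.toNat : Int)) * 17) 256) 0

def part1 (inpt : String) : Int :=
  (PySem.Chars.splitOn inpt.toList [',']).foldl (fun result code => result + hashCode code) 0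

-- ===== PORT B =====
-- one flat pass: state (curr, result); ',' flushes curr into result
def part1Step (p : Int × Int) (ch : Char) : Int × Int :=
  if ch = ',' then (0, p.2 + p.1)
  else (PySem.Int.mod ((p.1 + (ch.toNat : Int)) * 17) 256, p.2)

def part1_alt (inpt : String) : Int :=
  let p := inpt.toList.foldl part1Step (0, 0)
  p.2 + p.1

-- ===== PRECONDITION & SPEC =====
def Spec_part1 (inpt : String) (out : Int) : Prop := out = part1_alt inpt
instance (inpt : String) (out : Int) : Decidable (Spec_part1 inpt out) := by unfold Spec_part1; infer_instance

-- ===== CLAIM (what is proved, stated in full; the proofs are below) =====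
def Claim_equal_part1 : Prop := ∀ (inpt : String), Dom_part1 inpt → Spec_part1 inpt (part1 inpt)

-- ===== LEMMAS AND PROOFS =====

-- summing hashes with foldl is an offset plus the mapped sum
theorem foldl_hash_sum (ls : List (List Char)) (a : Int) :
    ls.foldl (fun result code => result + hashCode code) a = a + (ls.map hashCode).sum := by
  induction ls generalizing a with
  | nil => simp
  | cons c t ih => simp [List.foldl_cons, ih]; ring

-- the result component of B's fold is additive in its initial value
theorem part1Step_result_add (l : List Char) (c r : Int) :
    (l.foldl part1Step (c, r)).2 = r + (l.foldl part1Step (c, 0)).2 ∧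
    (l.foldl part1Step (c, r)).1 = (l.foldl part1Step (c, 0)).1 := by
  induction l generalizing c r with
  | nil => simp
  | cons ch t ih =>
    by_cases h : ch = ','
    · simp [part1Step, h, List.foldl_cons]
      obtain ⟨h1, h2⟩ := ih 0 (r + c)
      obtain ⟨h1', h2'⟩ := ih 0 c
      rw [h1, h1', h2, h2']; constructor <;> ring_nf
    · simp [part1Step, h, List.foldl_cons]
      exact ih _ _

-- core invariant: splitOn.go on the single-char separator ',' matches B's flat pass
theorem go_eq_flat (fuel : Nat) (l cur : List Char) (acc : List (List Char))
    (h : l.length ≤ fuel) :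
    ((PySem.Chars.splitOn.go [','] fuel l cur acc).map hashCode).sum
      = (acc.map hashCode).sum +
        ((l.foldl part1Step (hashCode cur.reverse, 0)).2 +
         (l.foldl part1Step (hashCode cur.reverse, 0)).1) := by
  induction fuel generalizing l cur acc with
  | zero =>
    have hl : l = [] := List.length_eq_zero_iff.mp (Nat.le_zero.mp h)
    subst hl
    simp [PySem.Chars.splitOn.go]
  | succ f ih =>
    cases l with
    | nil =>
      simp [PySem.Chars.splitOn.go]
    | cons c rest =>
      by_cases hc : c = ','
      · subst hc
        have : PySem.Chars.splitOn.go [','] (f+1) (','::rest) cur acc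
            = PySem.Chars.splitOn.go [','] f rest [] (cur.reverse :: acc) := by
          simp [PySem.Chars.splitOn.go, List.isPrefixOf]
        rw [this, ih rest [] _ (by simpa using Nat.lt_succ_iff.mp (by simpa using h))]
        have hz : hashCode ([] : List Char).reverse = 0 := rfl
        simp only [List.map_cons, List.sum_cons, List.foldl_cons, part1Step, reduceIte, hz]
        obtain ⟨h1, h2⟩ := part1Step_result_add rest 0 (0 + hashCode cur.reverse)
        rw [h1, h2]
        simp [hashCode]
        ring
      · have : PySem.Chars.splitOn.go [','] (f+1) (c::rest) cur acc
            = PySem.Chars.splitOn.go [','] f rest (c :: cur) acc := by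
          simp [PySem.Chars.splitOn.go, List.isPrefixOf, (Ne.symm hc : ',' ≠ c)]
        rw [this, ih rest (c :: cur) acc (by simpa using Nat.lt_succ_iff.mp (by simpa using h))]
        have hh : hashCode ((c :: cur).reverse)
            = PySem.Int.mod ((hashCode cur.reverse + (c.toNat : Int)) * 17) 256 := by
          simp [hashCode, List.foldl_append]
        rw [hh]
        simp [List.foldl_cons, part1Step, hc]

-- ===== VERDICT (by name: the statement is the Claim_ definition above) =====
theorem part1_spec : Claim_equal_part1 := by
  intro inpt _
  unfold Spec_part1 part1 part1_alt PySem.Chars.splitOn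
  rw [foldl_hash_sum]
  rw [go_eq_flat (inpt.toList.length + 1) inpt.toList [] [] (by omega)]
  simp [hashCode]
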